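-- pv_equiv track=rewrite | github.com/SquirtlesAlgorithmStudy/SquirtlesAlgorithmStudy-Hard | 민서/봉인된주문.py | solution
-- ===== SOURCE A (Python) =====
-- def s2n(string):
--     n = 0
--     b = 1
--     for _ in string:
--         n += b
--         b *= 26
--     b = 1
--     for c in reversed(string):
--         n += b * (ord(c) - ord('a'))
--         b *= 26
--     return n
--
-- def n2s(n):
--     digits = 1
--     b = 26
--     while n > b:
--         n -= b
--         b *= 26
--         digits += 1
--     n -= 1
--     string = []
--     while n:
--         string.append(chr(ord('a') + n % 26))
--         n //= 26
--     return 'a' * (digits - len(string)) + ''.join(string[::-1])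
--
-- def solution(n, bans):
--     bans = [s2n(b) for b in bans]
--     bans = sorted(bans)
--     i = 0
--     while i < len(bans) and n >= bans[i]:
--         i += 1
--         n += 1
--     return n2s(n)
-- ===== SOURCE B (Python) =====
-- def value(s):
--     # bijective base-26 value, single Horner pass (== s2n of the original)
--     v = 0
--     for c in s:
--         v = v * 26 + (ord(c) - ord('a') + 1)
--     return v
--
-- def n2s(n):
--     digits = 1
--     b = 26
--     while n > b:
--         n -= b
--         b *= 26
--         digits += 1
--     n -= 1
--     string = []
--     while n:
--         string.append(chr(ord('a') + n % 26))
--         n //= 26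
--     return 'a' * (digits - len(string)) + ''.join(string[::-1])
--
-- def solution(n, bans):
--     # answer = least fixpoint x >= n of x = n + #{bans <= x}; iterate by jumping,
--     # counting bans (with duplicates) without sorting them.
--     vals = [value(b) for b in bans]
--     x = n
--     for _ in range(len(vals) + 1):
--         y = n + sum(1 for v in vals if v <= x)
--         if y == x:
--             break
--         x = y
--     return n2s(x)
-- ===== Notes on version B (the rewrite author's own statement) =====
-- stated objective: alternative
-- what changed: Replaces the two-pass s2n by a single Horner-scheme bijective base-26 valuation, and the sort-then-linear-walk by a sort-free jumping fixpoint iteration x <- n + count(bans <= x) until stable, which reaches the same least fixpoint in at most len(bans)+1 rounds.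
import Mathlib
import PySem

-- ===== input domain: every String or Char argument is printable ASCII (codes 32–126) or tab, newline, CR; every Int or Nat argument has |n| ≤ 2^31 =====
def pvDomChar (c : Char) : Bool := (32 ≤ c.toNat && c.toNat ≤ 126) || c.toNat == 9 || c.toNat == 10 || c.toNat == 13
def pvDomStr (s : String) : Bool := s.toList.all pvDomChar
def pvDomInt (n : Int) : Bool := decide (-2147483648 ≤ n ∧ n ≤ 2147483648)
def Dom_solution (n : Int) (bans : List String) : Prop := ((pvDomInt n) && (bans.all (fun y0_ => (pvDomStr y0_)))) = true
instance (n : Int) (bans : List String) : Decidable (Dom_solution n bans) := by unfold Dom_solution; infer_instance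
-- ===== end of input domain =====

-- B replaces A's two-pass s2n by a one-pass Horner valuation and A's
-- sort-then-linear-walk by a sort-free jumping fixpoint iteration
-- (x ← n + count(bans ≤ x) until stable); equal return values proved on all inputs.

-- ===== PORT A =====
def s2nP (s : String) : Int :=
  let p1 := s.toList.foldl (fun (p : Int × Int) _ => (p.1 + p.2, p.2 * 26)) ((0 : Int), (1 : Int))
  let p2 := s.toList.reverse.foldl
    (fun (p : Int × Int) c => (p.1 + p.2 * ((c.toNat : Int) - 97), p.2 * 26)) (p1.1, (1 : Int))
  p2.1

-- first while-loop of n2s; the `0 < b` conjunct is a totality guard only (b is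
-- always a positive power of 26 times 26 at every call).
def n2sDigits (n b digits : Int) : Int × Int :=
  if h : b < n ∧ 0 < b then n2sDigits (n - b) (b * 26) (digits + 1) else (n, digits)
termination_by n.toNat
decreasing_by omega

-- second while-loop of n2s; Python's `while n:` with n ≥ 0 is `while n > 0`
-- (exact on every call on which Python's n2s returns; for n < 0 Python diverges).
def n2sChars (n : Int) : List Char :=
  if h : 0 < n then
    Char.ofNat (97 + (PySem.Int.mod n 26).toNat) :: n2sChars (PySem.Int.floordiv n 26)
  else []
termination_by n.toNat
decreasing_by
  have := PySem.Int.floordiv_eq_ediv_of_pos (a := n) (b := 26) (by omega)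
  omega

-- n2s (Source B carries this helper verbatim, so it is shared by both ports);
-- 'a' * (digits - len) with a possibly negative count is the empty string,
-- matched by Int.toNat's clamping.
def n2sP (n : Int) : String :=
  let p := n2sDigits n 26 1
  let s := n2sChars (p.1 - 1)
  String.mk (List.replicate (p.2 - (s.length : Int)).toNat 'a' ++ s.reverse)

-- A's while-loop over i and n: walking the index i through the sorted list is
-- transcribed as consuming the sorted list.
def solLoop : List Int → Int → Int
  | [], n => n
  | b :: t, n => if b ≤ n then solLoop t (n + 1) else n

def solution (n : Int) (bans : List String) : String :=
  n2sP (solLoop (PySem.List.sorted (bans.map s2nP) (fun x => x) false) n)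

-- ===== PORT B =====
-- Source B's value(s): one Horner pass, v ← v*26 + (ord(c) - ord('a') + 1)
def valueP (s : String) : Int :=
  s.toList.foldl (fun v c => v * 26 + ((c.toNat : Int) - 97 + 1)) 0

-- sum(1 for v in vals if v <= x)
def cntLe (vals : List Int) (x : Int) : Nat := vals.countP (fun v => decide (v ≤ x))

-- the bounded fixpoint loop of Source B: `for _ in range(len(vals)+1): …` with break
def altLoop (n : Int) (vals : List Int) : Nat → Int → Int
  | 0, x => x
  | f + 1, x =>
    let y := n + (cntLe vals x : Int)
    if y = x then x else altLoop n vals f y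

def solution_alt (n : Int) (bans : List String) : String :=
  let vals := bans.map valueP
  n2sP (altLoop n vals (vals.length + 1) n)

-- ===== PRECONDITION & SPEC =====
def Spec_solution (n : Int) (bans : List String) (out : String) : Prop := out = solution_alt n bans
instance (n : Int) (bans : List String) (out : String) : Decidable (Spec_solution n bans out) := by
  unfold Spec_solution; infer_instance

-- ===== CLAIM (what is proved, stated in full; the proofs are below) =====
def Claim_equal_solution : Prop := ∀ (n : Int) (bans : List String), Dom_solution n bans → Spec_solution n bans (solution n bans)

-- ===== LEMMAS AND PROOFS =====

-- geo m = 1 + 26 + … + 26^(m-1); be/le = big-/little-endian digit values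
def geo : Nat → Int
  | 0 => 0
  | m + 1 => 1 + 26 * geo m

def leV : List Char → Int
  | [] => 0
  | c :: t => ((c.toNat : Int) - 97) + 26 * leV t

def beV : List Char → Int
  | [] => 0
  | c :: t => ((c.toNat : Int) - 97) * 26 ^ t.length + beV t

theorem geo_succ' (m : Nat) : geo (m + 1) = geo m + 26 ^ m := by
  induction m with
  | zero => simp [geo]
  | succ k ih =>
    calc geo (k + 2) = 1 + 26 * geo (k + 1) := rfl
    _ = 1 + 26 * (geo k + 26 ^ k) := by rw [ih]
    _ = (1 + 26 * geo k) + 26 ^ (k + 1) := by ring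
    _ = geo (k + 1) + 26 ^ (k + 1) := rfl

theorem fold1_eq (l : List Char) (a b : Int) :
    l.foldl (fun (p : Int × Int) _ => (p.1 + p.2, p.2 * 26)) (a, b)
      = (a + b * geo l.length, b * 26 ^ l.length) := by
  induction l generalizing a b with
  | nil => simp [geo]
  | cons c t ih =>
    simp only [List.foldl_cons, ih, List.length_cons, Prod.mk.injEq]
    constructor
    · show a + b + b * 26 * geo t.length = a + b * geo (t.length + 1)
      simp only [geo]; ring
    · show b * 26 * 26 ^ t.length = b * 26 ^ (t.length + 1)
      ring

theorem fold2_eq (l : List Char) (a b : Int) :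
    l.foldl (fun (p : Int × Int) c => (p.1 + p.2 * ((c.toNat : Int) - 97), p.2 * 26)) (a, b)
      = (a + b * leV l, b * 26 ^ l.length) := by
  induction l generalizing a b with
  | nil => simp [leV]
  | cons c t ih =>
    simp only [List.foldl_cons, ih, List.length_cons, Prod.mk.injEq]
    constructor
    · show a + b * ((c.toNat : Int) - 97) + b * 26 * leV t = a + b * leV (c :: t)
      simp only [leV]; ring
    · show b * 26 * 26 ^ t.length = b * 26 ^ (t.length + 1)
      ring

theorem leV_append (xs : List Char) (c : Char) :
    leV (xs ++ [c]) = leV xs + ((c.toNat : Int) - 97) * 26 ^ xs.length := by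
  induction xs with
  | nil => simp [leV]
  | cons d t ih =>
    simp only [List.cons_append, leV, ih, List.length_cons]
    ring

theorem leV_reverse (l : List Char) : leV l.reverse = beV l := by
  induction l with
  | nil => rfl
  | cons c t ih =>
    simp only [List.reverse_cons, leV_append, ih, List.length_reverse, beV]
    ring

theorem horner_eq (l : List Char) (a : Int) :
    l.foldl (fun v c => v * 26 + ((c.toNat : Int) - 97 + 1)) a
      = a * 26 ^ l.length + geo l.length + beV l := by
  induction l generalizing a with
  | nil => simp [geo, beV]
  | cons c t ih =>
    simp only [List.foldl_cons, ih, List.length_cons, beV, geo_succ']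
    ring

theorem valueP_eq_s2nP (s : String) : valueP s = s2nP s := by
  unfold valueP s2nP
  rw [horner_eq, fold1_eq]
  simp only [fold2_eq, leV_reverse, List.length_reverse]
  ring

theorem cntLe_mono (l : List Int) {x y : Int} (h : x ≤ y) : cntLe l x ≤ cntLe l y := by
  induction l with
  | nil => simp [cntLe]
  | cons a t ih =>
    simp only [cntLe, List.countP_cons] at *
    by_cases h1 : a ≤ x
    · have h2 : a ≤ y := le_trans h1 h
      simp [h1, h2]; omega
    · by_cases h2 : a ≤ y <;> simp [h1, h2] <;> omega

theorem solLoop_ge (l : List Int) (n : Int) : n ≤ solLoop l n := by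
  induction l generalizing n with
  | nil => simp [solLoop]
  | cons b t ih =>
    simp only [solLoop]
    split
    · exact le_trans (by omega) (ih (n + 1))
    · exact le_refl n

theorem solLoop_fix (l : List Int) (hs : l.Pairwise (· ≤ ·)) (n : Int) :
    solLoop l n = n + (cntLe l (solLoop l n) : Int) := by
  induction l generalizing n with
  | nil => simp [solLoop, cntLe]
  | cons b t ih =>
    rcases List.pairwise_cons.mp hs with ⟨hb, ht⟩
    by_cases hbn : b ≤ n
    · simp only [solLoop, if_pos hbn]
      have hge : n + 1 ≤ solLoop t (n + 1) := solLoop_ge t (n + 1)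
      have hcnt : cntLe (b :: t) (solLoop t (n + 1)) = cntLe t (solLoop t (n + 1)) + 1 := by
        simp only [cntLe, List.countP_cons]
        have : b ≤ solLoop t (n + 1) := by omega
        simp [this]
      rw [hcnt]
      have := ih ht (n + 1)
      push_cast
      omega
    · simp only [solLoop, if_neg hbn]
      have : cntLe (b :: t) n = 0 := by
        simp only [cntLe]
        rw [List.countP_eq_zero]
        intro v hv
        simp only [decide_eq_true_eq]
        rcases List.mem_cons.mp hv with rfl | hvt
        · omega
        · have := hb v hvt; omega
      rw [this]; simp

theorem solLoop_min (l : List Int) (hs : l.Pairwise (· ≤ ·)) (n y : Int)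
    (hny : n ≤ y) (hfix : y = n + (cntLe l y : Int)) : solLoop l n ≤ y := by
  induction l generalizing n with
  | nil => simpa [solLoop] using hny
  | cons b t ih =>
    rcases List.pairwise_cons.mp hs with ⟨hb, ht⟩
    by_cases hbn : b ≤ n
    · simp only [solLoop, if_pos hbn]
      have hby : b ≤ y := le_trans hbn hny
      have hcnt : cntLe (b :: t) y = cntLe t y + 1 := by
        simp only [cntLe, List.countP_cons]; simp [hby]
      apply ih ht (n + 1)
      · rw [hcnt] at hfix; push_cast at hfix; omega
      · rw [hcnt] at hfix; push_cast at hfix; omega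
    · simpa [solLoop, if_neg hbn] using hny

theorem altLoop_fixed (n : Int) (vals : List Int) (f : Nat) (r : Int)
    (hr : r = n + (cntLe vals r : Int)) : altLoop n vals f r = r := by
  cases f with
  | zero => rfl
  | succ f => simp [altLoop, ← hr]

theorem altLoop_reaches (n : Int) (vals : List Int) (r : Int)
    (hfix : r = n + (cntLe vals r : Int))
    (hmin : ∀ y, n ≤ y → y = n + (cntLe vals y : Int) → r ≤ y) :
    ∀ (f : Nat) (x : Int), n ≤ x → x ≤ r → x ≤ n + (cntLe vals x : Int) →
      cntLe vals r - cntLe vals x ≤ f → altLoop n vals (f + 1) x = r := by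
  intro f
  induction f with
  | zero =>
    intro x hnx hxr hinv hm
    have hmono : cntLe vals x ≤ cntLe vals r := cntLe_mono vals hxr
    have hcr : cntLe vals x = cntLe vals r := by omega
    simp only [altLoop]
    split
    · rename_i heq
      have : r ≤ x := hmin x hnx (by omega)
      omega
    · show n + (cntLe vals x : Int) = r
      omega
  | succ f ih =>
    intro x hnx hxr hinv hm
    simp only [altLoop]
    split
    · rename_i heq
      have : r ≤ x := hmin x hnx (by omega)
      omega
    · rename_i hne
      set y := n + (cntLe vals x : Int) with hy
      have hxy : x < y := lt_of_le_of_ne hinv (fun h => hne (by omega))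
      have hcxy : cntLe vals x ≤ cntLe vals y := cntLe_mono vals (le_of_lt hxy)
      have hcyr : cntLe vals y ≤ cntLe vals r := cntLe_mono vals (by
        have := cntLe_mono vals hxr; omega)
      by_cases hc : cntLe vals y = cntLe vals x
      · -- y is already a fixpoint, hence y = r; remaining fuel just returns it
        have hyfix : y = n + (cntLe vals y : Int) := by rw [hc]
        have : r ≤ y := hmin y (by omega) hyfix
        have hyr : y = r := by
          have : y ≤ r := by have := cntLe_mono vals hxr; omega
          omega
        rw [hyr]
        exact altLoop_fixed n vals (f + 1) r hfix
      · exact ih y (by omega) (by have := cntLe_mono vals hxr; omega)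
          (by omega) (by omega)

theorem main_eq (n : Int) (bans : List String) :
    solLoop (PySem.List.sorted (bans.map s2nP) (fun x => x) false) n
      = altLoop n (bans.map s2nP) ((bans.map s2nP).length + 1) n := by
  set vals := bans.map s2nP with hv
  set s := PySem.List.sorted vals (fun x => x) false with hsdef
  have hperm : s.Perm vals := PySem.List.sorted_perm vals (fun x => x) false
  have hcnt : ∀ x, cntLe s x = cntLe vals x := fun x => hperm.countP_eq _
  have hpw : s.Pairwise (· ≤ ·) := by
    have := PySem.List.sorted_pairwise (xs := vals) (key := fun x => x)
    simpa using this
  set r := solLoop s n with hr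
  have hfix : r = n + (cntLe vals r : Int) := by
    rw [← hcnt]; exact solLoop_fix s hpw n
  have hmin : ∀ y, n ≤ y → y = n + (cntLe vals y : Int) → r ≤ y := by
    intro y h1 h2
    exact solLoop_min s hpw n y h1 (by rw [hcnt]; exact h2)
  have hge : n ≤ r := solLoop_ge s n
  have hlen : cntLe vals r ≤ vals.length := List.countP_le_length
  have := altLoop_reaches n vals r hfix hmin vals.length n (le_refl n) hge
    (by have : (0 : Int) ≤ (cntLe vals n : Int) := by positivity
        omega)
    (by omega)
  rw [this]

-- ===== VERDICT (by name: the statement is the Claim_ definition above) =====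
theorem solution_spec : Claim_equal_solution := by
  intro n bans _
  unfold Spec_solution solution solution_alt
  have hmap : bans.map valueP = bans.map s2nP :=
    List.map_congr_left (fun s _ => valueP_eq_s2nP s)
  rw [hmap, main_eq]
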